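-- pv_equiv track=rewrite | github.com/BryanM2204/CSE-2050 | HW/HW_7/MagicSort.py | linear_scan
-- ===== SOURCE A (Python) =====
-- def linear_scan(L):
--     "Performs linear scans that checks to see whether the list is sorted, reversed, or if there is at most 5 items out of place"
--
--     counter = 0
--     # For loop that uses the range of the list to represent the index - compares first number with the next number if they are in order or not
--     # updates counter if they are not
--     for i in range(len(L)-1):
--         if L[i] > L[i+1]:
--             counter += 1
--
--     # Checks to see if list is sorted
--     if L == sorted(L):
--         return "sorted"
--
--     # Checks to see that the list has at most 5 numbers out of place
--     if 0 < counter <= 5 and L != sorted(L, reverse=True):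
--         insertionsort(L)
--         return "insertion"
--
--     # Checks to see if list is sorted in reverse
--     elif L == sorted(L, reverse=True):
--         reverse_list(L)
--         return "reverse-list"
--
-- def reverse_list(L):
--     "Takes a list that is already known to be in reverse from linear_scan and splices it to reverse it"
--
--     L = L[::-1]
--     return L
--
-- def insertionsort(L, left=0, right=None):
--     "Performs an insertion sort, either with the original list from linear_scan or from a sublist from either quicksort or mergesort"
--
--     # Sets right to length of list
--     if right is None: right = len(L)
--
--     n = right - left
--     # nested for loop to iterate through the list that compares two nnumbers next to eachother and switches them depending on size
--     for i in range(n):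
--         for j in range(left+1, right): #Look at the last i items of the list
--             if L[j-1] > L[j]: # if the items are out of order
--                 L[j], L[j-1] = L[j-1], L[j] # switch them
-- ===== SOURCE B (Python) =====
-- def linear_scan(L):
--     "One pass counting adjacent descents/ascents; never calls sorted()"
--     desc = asc = 0
--     for x, y in zip(L, L[1:]):
--         if x > y:
--             desc += 1
--         elif x < y:
--             asc += 1
--     if desc == 0:
--         return "sorted"
--     if desc <= 5 and asc != 0:
--         insertionsort(L)
--         return "insertion"
--     elif asc == 0:
--         return "reverse-list"
--
-- def insertionsort(L, left=0, right=None):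
--     if right is None: right = len(L)
--     n = right - left
--     for i in range(n):
--         for j in range(left+1, right):
--             if L[j-1] > L[j]:
--                 L[j], L[j-1] = L[j-1], L[j]
-- ===== Notes on version B (the rewrite author's own statement) =====
-- stated objective: faster
-- what changed: B classifies the list in one adjacent-pair pass that counts strict descents and ascents and decides every branch from those two counters, instead of A's index loop plus two full sorted() comparisons.
import Mathlib
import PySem

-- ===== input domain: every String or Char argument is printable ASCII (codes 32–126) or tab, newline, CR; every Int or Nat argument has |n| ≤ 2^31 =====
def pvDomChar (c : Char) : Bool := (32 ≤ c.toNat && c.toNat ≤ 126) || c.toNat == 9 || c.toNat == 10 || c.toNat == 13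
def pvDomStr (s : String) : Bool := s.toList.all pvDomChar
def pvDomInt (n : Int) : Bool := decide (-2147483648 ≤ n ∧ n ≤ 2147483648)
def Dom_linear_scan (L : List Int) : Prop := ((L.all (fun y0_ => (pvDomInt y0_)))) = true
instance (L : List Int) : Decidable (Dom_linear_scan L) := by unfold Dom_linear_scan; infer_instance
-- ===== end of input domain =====

-- B replaces A's descent count + two sorted() comparisons by one pass counting descents and
-- ascents, deciding every branch from those two counters (objective: faster — no sorting).
-- Equivalence is about the RETURN value; both Pythons mutate L identically ('insertionsort'
-- in the same branch; A's 'reverse_list' rebinds a local, so it never mutates the argument).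

-- ===== PORT A =====
-- indices i and i+1 are always in range below, so pyGetD is exact (no IndexError possible)
def linear_scan (L : List Int) : Option String :=
  let counter : Int :=
    (PySem.List.pyRange 0 ((L.length : Int) - 1) 1).foldl
      (fun c i => if PySem.List.pyGetD L i 0 > PySem.List.pyGetD L (i + 1) 0 then c + 1 else c) 0
  if L = PySem.List.sorted L (fun x => x) false then some "sorted"
  else if 0 < counter ∧ counter ≤ 5 ∧ L ≠ PySem.List.sorted L (fun x => x) true then
    some "insertion"   -- insertionsort(L) mutates L; return value unaffected
  else if L = PySem.List.sorted L (fun x => x) true then some "reverse-list"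
  else none

-- ===== PORT B =====
def linear_scan_alt (L : List Int) : Option String :=
  let p : Int × Int :=
    (L.zip (L.drop 1)).foldl
      (fun (da : Int × Int) (xy : Int × Int) =>
        if xy.1 > xy.2 then (da.1 + 1, da.2)
        else if xy.1 < xy.2 then (da.1, da.2 + 1)
        else da) (0, 0)
  if p.1 = 0 then some "sorted"
  else if p.1 ≤ 5 ∧ p.2 ≠ 0 then some "insertion"   -- insertionsort(L) mutates L
  else if p.2 = 0 then some "reverse-list"
  else none

-- ===== PRECONDITION & SPEC =====
def Spec_linear_scan (L : List Int) (out : Option String) : Prop := out = linear_scan_alt L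
instance (L : List Int) (out : Option String) : Decidable (Spec_linear_scan L out) := by unfold Spec_linear_scan; infer_instance

-- ===== CLAIM (what is proved, stated in full; the proofs are below) =====
def Claim_equal_linear_scan : Prop := ∀ (L : List Int), Dom_linear_scan L → Spec_linear_scan L (linear_scan L)

-- ===== LEMMAS AND PROOFS =====

/-- number of adjacent strict descents -/
def pvDesc : List Int → Int
  | x :: y :: t => (if x > y then 1 else 0) + pvDesc (y :: t)
  | _ => 0

/-- number of adjacent strict ascents -/
def pvAsc : List Int → Int
  | x :: y :: t => (if x < y then 1 else 0) + pvAsc (y :: t)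
  | _ => 0

theorem pvDesc_nonneg : ∀ L, 0 ≤ pvDesc L := by
  intro L
  induction L with
  | nil => simp [pvDesc]
  | cons x t ih =>
    cases t with
    | nil => simp [pvDesc]
    | cons y t' => simp only [pvDesc]; split_ifs <;> omega

theorem pvAsc_nonneg : ∀ L, 0 ≤ pvAsc L := by
  intro L
  induction L with
  | nil => simp [pvAsc]
  | cons x t ih =>
    cases t with
    | nil => simp [pvAsc]
    | cons y t' => simp only [pvAsc]; split_ifs <;> omega

/-- B's single pass computes the two counters. -/
theorem pvFoldB (L : List Int) : ∀ (d a : Int),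
    (L.zip (L.drop 1)).foldl
      (fun (da : Int × Int) (xy : Int × Int) =>
        if xy.1 > xy.2 then (da.1 + 1, da.2)
        else if xy.1 < xy.2 then (da.1, da.2 + 1)
        else da) (d, a) = (d + pvDesc L, a + pvAsc L) := by
  induction L with
  | nil => intro d a; simp [pvDesc, pvAsc]
  | cons x t ih =>
    intro d a
    cases t with
    | nil => simp [pvDesc, pvAsc]
    | cons y t' =>
      simp only [List.drop_one, List.tail_cons, List.zip_cons_cons, List.foldl_cons]
      have h := ih
      simp only [List.drop_one, List.tail_cons] at h
      simp only [pvDesc, pvAsc]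
      split_ifs with h1 h2 <;> rw [h] <;> simp only [Prod.mk.injEq] <;> constructor <;> omega

/-- A's range loop computes the descent counter (stated over Nat indices / List.getD). -/
theorem pvFoldA (L : List Int) : ∀ (c : Int),
    (List.range (L.length - 1)).foldl
      (fun c k => if L.getD k 0 > L.getD (k + 1) 0 then c + 1 else c) c = c + pvDesc L := by
  induction L with
  | nil => intro c; simp [pvDesc]
  | cons x t ih =>
    intro c
    cases t with
    | nil => simp [pvDesc]
    | cons y t' =>
      have hr : (x :: y :: t').length - 1 = (y :: t').length - 1 + 1 := by
        simp [List.length_cons]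
      rw [hr, List.range_succ_eq_map, List.foldl_cons, List.foldl_map]
      have hb : (fun (c : Int) (k : Nat) =>
            if (x :: y :: t').getD (k + 1) 0 > (x :: y :: t').getD (k + 1 + 1) 0 then c + 1 else c)
          = (fun (c : Int) (k : Nat) =>
            if (y :: t').getD k 0 > (y :: t').getD (k + 1) 0 then c + 1 else c) := by
        funext c k; simp
      simp only [Nat.succ_eq_add_one, hb]
      rw [ih]
      simp only [pvDesc, List.getD_cons_succ, List.getD_cons_zero]
      split_ifs <;> omega

theorem pvDesc_zero_iff (L : List Int) : pvDesc L = 0 ↔ List.IsChain (· ≤ ·) L := by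
  induction L with
  | nil => exact ⟨fun _ => List.isChain_nil, fun _ => rfl⟩
  | cons x t ih =>
    cases t with
    | nil =>
      simp [pvDesc]
    | cons y t' =>
      rw [List.isChain_cons_cons, ← ih]
      have h := pvDesc_nonneg (y :: t')
      simp only [pvDesc]
      split_ifs with hxy
      · constructor
        · intro h0; omega
        · rintro ⟨h1, _⟩; omega
      · constructor
        · intro h0; exact ⟨by omega, by omega⟩
        · rintro ⟨_, h2⟩; omega

theorem pvAsc_zero_iff (L : List Int) : pvAsc L = 0 ↔ List.IsChain (fun a b => b ≤ a) L := by
  induction L with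
  | nil => exact ⟨fun _ => List.isChain_nil, fun _ => rfl⟩
  | cons x t ih =>
    cases t with
    | nil =>
      simp [pvAsc]
    | cons y t' =>
      rw [List.isChain_cons_cons, ← ih]
      have h := pvAsc_nonneg (y :: t')
      simp only [pvAsc]
      split_ifs with hxy
      · constructor
        · intro h0; omega
        · rintro ⟨h1, _⟩; omega
      · constructor
        · intro h0; exact ⟨by omega, by omega⟩
        · rintro ⟨_, h2⟩; omega

theorem pvSortedF_iff (L : List Int) :
    L = PySem.List.sorted L (fun x => x) false ↔ pvDesc L = 0 := by
  rw [pvDesc_zero_iff]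
  constructor
  · intro h
    have hp := PySem.List.sorted_pairwise (xs := L) (key := fun x => x)
    rw [← h] at hp
    have hp' : L.Pairwise (· ≤ ·) := by simpa using hp
    exact List.isChain_iff_pairwise.mpr hp'
  · intro h
    have hp : L.Pairwise (fun a b : Int => (fun x : Int => x) a ≤ (fun x : Int => x) b) := by
      simpa using List.isChain_iff_pairwise.mp h
    exact (PySem.List.sorted_eq_self_of_pairwise L (fun x => x) hp).symm

theorem pvSortedR_iff (L : List Int) :
    L = PySem.List.sorted L (fun x => x) true ↔ pvAsc L = 0 := by
  rw [pvAsc_zero_iff]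
  have htrans : Trans (fun a b : Int => b ≤ a) (fun a b : Int => b ≤ a) (fun a b : Int => b ≤ a) :=
    ⟨fun hab hbc => le_trans hbc hab⟩
  constructor
  · intro h
    have hp := PySem.List.sorted_pairwise_rev (xs := L) (key := fun x => x)
    rw [← h] at hp
    have hp' : L.Pairwise (fun a b => b ≤ a) := by simpa using hp
    exact (@List.isChain_iff_pairwise _ _ L htrans).mpr hp'
  · intro h
    have hp : L.Pairwise (fun a b : Int => (fun x : Int => x) b ≤ (fun x : Int => x) a) := by
      simpa using (@List.isChain_iff_pairwise _ _ L htrans).mp h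
    exact (PySem.List.sorted_rev_eq_self_of_pairwise L (fun x => x) hp).symm

/-- A's counter (the literal pyRange/pyGetD fold) equals pvDesc. -/
theorem pvCounterA (L : List Int) :
    (PySem.List.pyRange 0 ((L.length : Int) - 1) 1).foldl
      (fun c i => if PySem.List.pyGetD L i 0 > PySem.List.pyGetD L (i + 1) 0 then c + 1 else c)
      (0 : Int) = pvDesc L := by
  cases L with
  | nil => simp [PySem.List.pyRange, pvDesc]
  | cons x t =>
    have hlen : (((x :: t).length : Int) - 1) = (((x :: t).length - 1 : Nat) : Int) := by
      simp [List.length_cons]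
    rw [hlen, PySem.List.pyRange_zero_natCast, List.foldl_map]
    have hb : (fun (c : Int) (k : Nat) =>
          if PySem.List.pyGetD (x :: t) (k : Int) 0 > PySem.List.pyGetD (x :: t) ((k : Int) + 1) 0
          then c + 1 else c)
        = (fun (c : Int) (k : Nat) =>
          if (x :: t).getD k 0 > (x :: t).getD (k + 1) 0 then c + 1 else c) := by
      funext c k
      have h1 : ((k : Int) + 1) = ((k + 1 : Nat) : Int) := by push_cast; ring
      rw [h1, PySem.List.pyGetD_natCast, PySem.List.pyGetD_natCast]
    rw [hb, pvFoldA]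
    ring

-- ===== VERDICT (by name: the statement is the Claim_ definition above) =====
theorem linear_scan_spec : Claim_equal_linear_scan := by
  intro L _
  unfold Spec_linear_scan linear_scan linear_scan_alt
  simp only [pvCounterA, pvFoldB, zero_add]
  have hd0 := pvDesc_nonneg L
  have hsf := pvSortedF_iff L
  have hsr := pvSortedR_iff L
  by_cases h1 : pvDesc L = 0
  · rw [if_pos (hsf.mpr h1), if_pos h1]
  · rw [if_neg (fun h => h1 (hsf.mp h)), if_neg h1]
    by_cases h2 : pvDesc L ≤ 5 ∧ pvAsc L ≠ 0
    · rw [if_pos ⟨by omega, h2.1, fun h => h2.2 (hsr.mp h)⟩, if_pos h2]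
    · rw [if_neg (fun hc => h2 ⟨hc.2.1, fun h0 => hc.2.2 (hsr.mpr h0)⟩), if_neg h2]
      by_cases h3 : pvAsc L = 0
      · rw [if_pos (hsr.mpr h3), if_pos h3]
      · rw [if_neg (fun h => h3 (hsr.mp h)), if_neg h3]
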